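-- pv_equiv track=rewrite | github.com/kaustubh-karnik/syrus-2026 | backend/app/agents/sandbox_runner.py | _any_relevant_test_passed
-- ===== SOURCE A (Python) =====
-- def _any_relevant_test_passed(selected_tests: list[str], passed_tests: list[str]) -> bool:
--     if not selected_tests or not passed_tests:
--         return False
--
--     normalized_selected = [str(item or "").replace("\\", "/").strip().lower() for item in selected_tests]
--     normalized_passed = [str(item or "").replace("\\", "/").strip().lower() for item in passed_tests]
--
--     for selected in normalized_selected:
--         if not selected:
--             continue
--         selected_file = selected.split("::", 1)[0]
--         for passed in normalized_passed:
--             passed_file = passed.split("::", 1)[0]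
--             if (
--                 selected == passed
--                 or selected_file == passed_file
--                 or passed_file.endswith(selected_file)
--                 or selected_file.endswith(passed_file)
--             ):
--                 return True
--     return False
-- ===== SOURCE B (Python) =====
-- def _any_relevant_test_passed(selected_tests: list[str], passed_tests: list[str]) -> bool:
--     def norm(item):
--         return str(item or "").replace("\\", "/").strip().lower()
--
--     passed_files = [norm(p).split("::", 1)[0] for p in passed_tests]
--     # Suffix relation either way == prefix relation on reversed strings:
--     # index all prefixes of reversed passed files, plus the reversed files themselves.
--     rev_passed = {f[::-1] for f in passed_files}
--     prefix_set = {f[::-1][:i] for f in passed_files for i in range(len(f) + 1)}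
--     for item in selected_tests:
--         ns = norm(item)
--         if not ns:
--             continue
--         r = ns.split("::", 1)[0][::-1]
--         if r in prefix_set or any(r[:i] in rev_passed for i in range(len(r) + 1)):
--             return True
--     return False
-- ===== Notes on version B (the rewrite author's own statement) =====
-- stated objective: alternative
-- what changed: Replaces the nested all-pairs suffix comparison by a one-time prefix index of the reversed passed file paths (suffix either way = prefix relation on reversed strings), so each selected path is probed against sets instead of scanned against every passed path.
import Mathlib
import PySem

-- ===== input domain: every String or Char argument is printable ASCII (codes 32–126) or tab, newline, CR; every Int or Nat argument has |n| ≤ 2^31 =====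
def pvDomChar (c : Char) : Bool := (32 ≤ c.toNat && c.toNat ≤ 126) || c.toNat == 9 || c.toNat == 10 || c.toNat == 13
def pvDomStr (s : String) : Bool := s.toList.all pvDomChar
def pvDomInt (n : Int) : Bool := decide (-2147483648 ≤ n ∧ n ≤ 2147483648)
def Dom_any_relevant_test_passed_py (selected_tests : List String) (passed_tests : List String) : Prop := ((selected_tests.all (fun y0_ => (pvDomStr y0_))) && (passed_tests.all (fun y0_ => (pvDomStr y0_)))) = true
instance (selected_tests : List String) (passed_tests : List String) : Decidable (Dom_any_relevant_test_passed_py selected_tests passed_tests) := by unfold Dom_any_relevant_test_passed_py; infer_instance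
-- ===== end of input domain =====

-- B replaces A's nested all-pairs suffix comparison by a prefix index over the reversed
-- passed file paths (suffix either way = prefix relation on reversed strings): an
-- alternative algorithm of similar measured cost.

-- ===== PORT A =====
-- str(item or "").replace("\\", "/").strip().lower()
def pvNormA (item : String) : String :=
  PySem.Str.lower (PySem.Str.strip (PySem.Str.replace (if item == "" then "" else item) "\\" "/"))

-- s.split("::", 1)[0]  (split with a non-empty separator always yields a non-empty list)
def pvFileA (s : String) : String :=
  match PySem.Str.splitMax? s "::" 1 with
  | some (f :: _) => f
  | _ => ""

def any_relevant_test_passed_py (selected_tests : List String) (passed_tests : List String) : Bool :=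
  if selected_tests.isEmpty || passed_tests.isEmpty then false
  else
    let normalized_selected := selected_tests.map pvNormA
    let normalized_passed := passed_tests.map pvNormA
    normalized_selected.any (fun selected =>
      if selected == "" then false
      else
        let selected_file := pvFileA selected
        normalized_passed.any (fun passed =>
          let passed_file := pvFileA passed
          selected == passed || selected_file == passed_file ||
            PySem.Str.endswith passed_file selected_file ||
            PySem.Str.endswith selected_file passed_file))

-- ===== PORT B =====
def pvNormB (item : String) : String :=
  PySem.Str.lower (PySem.Str.strip (PySem.Str.replace (if item == "" then "" else item) "\\" "/"))

def pvFileB (s : String) : String :=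
  match PySem.Str.splitMax? s "::" 1 with
  | some (f :: _) => f
  | _ => ""

-- s[::-1]
def pvRev (s : String) : String := (PySem.Str.slice? s none none (-1)).getD ""

def any_relevant_test_passed_py_alt (selected_tests : List String) (passed_tests : List String) : Bool :=
  let passed_files := passed_tests.map (fun p => pvFileB (pvNormB p))
  let rev_passed : PySem.Set String := PySem.Set.ofList (passed_files.map pvRev)
  let prefix_set : PySem.Set String := PySem.Set.ofList (passed_files.flatMap (fun f =>
      (PySem.List.pyRange 0 (PySem.Str.len f + 1)).map (fun i =>
        PySem.Str.slice (pvRev f) none (some i))))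
  selected_tests.any (fun item =>
    let ns := pvNormB item
    if ns == "" then false
    else
      let r := pvRev (pvFileB ns)
      prefix_set.contains r ||
        (PySem.List.pyRange 0 (PySem.Str.len r + 1)).any (fun i =>
          rev_passed.contains (PySem.Str.slice r none (some i))))

-- ===== PRECONDITION & SPEC =====
def Spec_any_relevant_test_passed_py (selected_tests : List String) (passed_tests : List String) (out : Bool) : Prop := out = any_relevant_test_passed_py_alt selected_tests passed_tests
instance (selected_tests : List String) (passed_tests : List String) (out : Bool) : Decidable (Spec_any_relevant_test_passed_py selected_tests passed_tests out) := by unfold Spec_any_relevant_test_passed_py; infer_instance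

-- ===== CLAIM (what is proved, stated in full; the proofs are below) =====
def Claim_equal_any_relevant_test_passed_py : Prop := ∀ (selected_tests : List String) (passed_tests : List String), Dom_any_relevant_test_passed_py selected_tests passed_tests → Spec_any_relevant_test_passed_py selected_tests passed_tests (any_relevant_test_passed_py selected_tests passed_tests)

-- ===== LEMMAS AND PROOFS =====

-- The suffix relation both programs decide, per selected/passed pair of file parts.
def pvRel (sf pf : String) : Prop := sf.toList <:+ pf.toList ∨ pf.toList <:+ sf.toList

theorem pvFileB_eq_A (s : String) : pvFileB s = pvFileA s := rfl

theorem pvNormB_eq_A (s : String) : pvNormB s = pvNormA s := rfl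

theorem pvRev_toList (s : String) : (pvRev s).toList = s.toList.reverse := by
  simp [pvRev, PySem.Str.slice?_none_none_neg_one]

theorem pvSlice_toList (s : String) (i : Int) (h : 0 ≤ i) :
    (PySem.Str.slice s none (some i)).toList = s.toList.take i.toNat := by
  rw [PySem.Str.toList_slice, PySem.Chars.slice_eq_listSlice, PySem.List.slice_to _ h]

-- A's four-way test collapses to the two endswith tests.
theorem pvCond_eq (s p : String) :
    (s == p || pvFileA s == pvFileA p ||
      PySem.Str.endswith (pvFileA p) (pvFileA s) ||
      PySem.Str.endswith (pvFileA s) (pvFileA p))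
    = (PySem.Str.endswith (pvFileA p) (pvFileA s) ||
       PySem.Str.endswith (pvFileA s) (pvFileA p)) := by
  have hself : ∀ t : List Char, PySem.Chars.endswith t t = true := by
    intro t
    simp [PySem.Chars.endswith_iff]
  by_cases h : s = p
  · subst h
    simp [hself]
  · by_cases h2 : pvFileA s = pvFileA p
    · rw [h2]
      simp [hself]
    · rw [beq_eq_false_iff_ne.mpr h, beq_eq_false_iff_ne.mpr h2]
      simp

theorem pvEndswith_iff (s p : String) :
    PySem.Str.endswith s p = true ↔ p.toList <:+ s.toList := by
  rw [PySem.Str.endswith_eq]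
  exact PySem.Chars.endswith_iff _ _

-- membership in the prefix index ↔ some passed file has x's reversal as a suffix? stated directly:
theorem pv_mem_prefix_set (files : List String) (x : String) :
    (PySem.Set.ofList (files.flatMap (fun f =>
        (PySem.List.pyRange 0 (PySem.Str.len f + 1)).map (fun i =>
          PySem.Str.slice (pvRev f) none (some i))))).contains x = true
    ↔ ∃ f ∈ files, x.toList <+: f.toList.reverse := by
  rw [PySem.Set.contains_iff, PySem.Set.mem_ofList]
  simp only [List.mem_flatMap, List.mem_map]
  constructor
  · rintro ⟨f, hf, i, hi, rfl⟩
    rw [PySem.List.mem_pyRange_one] at hi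
    refine ⟨f, hf, ?_⟩
    rw [pvSlice_toList _ _ hi.1, pvRev_toList]
    exact List.take_prefix _ _
  · rintro ⟨f, hf, hpre⟩
    refine ⟨f, hf, (x.toList.length : Int), ?_, ?_⟩
    · rw [PySem.List.mem_pyRange_one, PySem.Str.len_eq]
      have := hpre.length_le
      rw [List.length_reverse] at this
      omega
    · apply String.toList_inj.mp
      rw [pvSlice_toList _ _ (Int.natCast_nonneg _), pvRev_toList, Int.toNat_natCast]
      exact (List.prefix_iff_eq_take.mp hpre).symm

-- the probe loop: some prefix of r is a reversed passed file
theorem pv_probe_iff (files : List String) (r : String) :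
    ((PySem.List.pyRange 0 (PySem.Str.len r + 1)).any (fun i =>
        (PySem.Set.ofList (files.map pvRev)).contains (PySem.Str.slice r none (some i))) = true)
    ↔ ∃ f ∈ files, f.toList.reverse <+: r.toList := by
  rw [List.any_eq_true]
  constructor
  · rintro ⟨i, hi, hc⟩
    rw [PySem.List.mem_pyRange_one] at hi
    rw [PySem.Set.contains_iff, PySem.Set.mem_ofList, List.mem_map] at hc
    obtain ⟨f, hf, hfe⟩ := hc
    refine ⟨f, hf, ?_⟩
    have : (pvRev f).toList = (PySem.Str.slice r none (some i)).toList := by rw [hfe]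
    rw [pvRev_toList, pvSlice_toList _ _ hi.1] at this
    rw [this]
    exact List.take_prefix _ _
  · rintro ⟨f, hf, hpre⟩
    refine ⟨(f.toList.reverse.length : Int), ?_, ?_⟩
    · rw [PySem.List.mem_pyRange_one, PySem.Str.len_eq]
      have := hpre.length_le
      constructor
      · exact Int.natCast_nonneg _
      · omega
    · rw [PySem.Set.contains_iff, PySem.Set.mem_ofList, List.mem_map]
      refine ⟨f, hf, ?_⟩
      apply String.toList_inj.mp
      rw [pvRev_toList, pvSlice_toList _ _ (Int.natCast_nonneg _), Int.toNat_natCast]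
      exact List.prefix_iff_eq_take.mp hpre

-- A = true ↔ the common characterization
theorem pvA_iff (sel pas : List String) :
    any_relevant_test_passed_py sel pas = true ↔
    ∃ s ∈ sel, ¬ pvNormA s = "" ∧ ∃ p ∈ pas, pvRel (pvFileA (pvNormA s)) (pvFileA (pvNormA p)) := by
  unfold any_relevant_test_passed_py
  by_cases hs : sel.isEmpty
  · rw [List.isEmpty_iff] at hs
    subst hs
    simp
  · by_cases hp : pas.isEmpty
    · rw [List.isEmpty_iff] at hp
      subst hp
      simp [hs]
    · rw [if_neg (by simp [hs, hp])]
      rw [List.any_eq_true]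
      constructor
      · rintro ⟨ns, hns, hbody⟩
        obtain ⟨s, hsm, rfl⟩ := List.mem_map.mp hns
        by_cases hne : pvNormA s = ""
        · rw [if_pos (by simp [hne])] at hbody
          exact absurd hbody (by simp)
        · rw [if_neg (by simp [hne])] at hbody
          rw [List.any_eq_true] at hbody
          obtain ⟨np, hnp, hc⟩ := hbody
          obtain ⟨p, hpm, rfl⟩ := List.mem_map.mp hnp
          rw [pvCond_eq, Bool.or_eq_true, pvEndswith_iff, pvEndswith_iff] at hc
          exact ⟨s, hsm, hne, p, hpm, hc⟩
      · rintro ⟨s, hsm, hne, p, hpm, hrel⟩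
        refine ⟨pvNormA s, List.mem_map.mpr ⟨s, hsm, rfl⟩, ?_⟩
        rw [if_neg (by simp [hne])]
        rw [List.any_eq_true]
        refine ⟨pvNormA p, List.mem_map.mpr ⟨p, hpm, rfl⟩, ?_⟩
        rw [pvCond_eq, Bool.or_eq_true, pvEndswith_iff, pvEndswith_iff]
        exact hrel

theorem pvB_iff (sel pas : List String) :
    any_relevant_test_passed_py_alt sel pas = true ↔
    ∃ s ∈ sel, ¬ pvNormA s = "" ∧ ∃ p ∈ pas, pvRel (pvFileA (pvNormA s)) (pvFileA (pvNormA p)) := by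
  unfold any_relevant_test_passed_py_alt
  rw [List.any_eq_true]
  constructor
  · rintro ⟨s, hsm, hbody⟩
    by_cases hne : pvNormB s = ""
    · rw [if_pos (by simp [hne])] at hbody
      exact absurd hbody (by simp)
    · rw [if_neg (by simp [hne])] at hbody
      rw [Bool.or_eq_true] at hbody
      refine ⟨s, hsm, fun c => hne (by rw [pvNormB_eq_A]; exact c), ?_⟩
      rcases hbody with h | h
      · rw [pv_mem_prefix_set] at h
        obtain ⟨pf, hpf, hpre⟩ := h
        obtain ⟨p, hpm, rfl⟩ := List.mem_map.mp hpf
        refine ⟨p, hpm, Or.inl ?_⟩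
        rw [pvRev_toList, pvFileB_eq_A, pvNormB_eq_A, pvFileB_eq_A, pvNormB_eq_A] at hpre
        exact List.reverse_prefix.mp hpre
      · rw [pv_probe_iff] at h
        obtain ⟨pf, hpf, hpre⟩ := h
        obtain ⟨p, hpm, rfl⟩ := List.mem_map.mp hpf
        refine ⟨p, hpm, Or.inr ?_⟩
        rw [pvRev_toList, pvFileB_eq_A, pvNormB_eq_A, pvFileB_eq_A, pvNormB_eq_A] at hpre
        exact List.reverse_prefix.mp hpre
  · rintro ⟨s, hsm, hne, p, hpm, hrel⟩
    refine ⟨s, hsm, ?_⟩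
    rw [if_neg (by simp [pvNormB_eq_A, hne])]
    rw [Bool.or_eq_true]
    rcases hrel with h | h
    · left
      rw [pv_mem_prefix_set]
      refine ⟨pvFileB (pvNormB p), List.mem_map.mpr ⟨p, hpm, rfl⟩, ?_⟩
      rw [pvRev_toList, pvFileB_eq_A, pvNormB_eq_A, pvFileB_eq_A, pvNormB_eq_A]
      exact List.reverse_prefix.mpr h
    · right
      rw [pv_probe_iff]
      refine ⟨pvFileB (pvNormB p), List.mem_map.mpr ⟨p, hpm, rfl⟩, ?_⟩
      rw [pvRev_toList, pvFileB_eq_A, pvNormB_eq_A, pvFileB_eq_A, pvNormB_eq_A]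
      exact List.reverse_prefix.mpr h

-- ===== VERDICT (by name: the statement is the Claim_ definition above) =====
theorem any_relevant_test_passed_py_spec : Claim_equal_any_relevant_test_passed_py := by
  intro sel pas _
  unfold Spec_any_relevant_test_passed_py
  rw [Bool.eq_iff_iff, pvA_iff, pvB_iff]
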